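-- pv_equiv track=rewrite | github.com/aymanehachcham/diachronic-hwe | diachronic_hwe/hwe/infer_hwe.py | overlapped_clusters
-- ===== SOURCE A (Python) =====
-- from typing import List, Tuple, Dict
--
-- def overlapped_clusters(clusters_a: List[List[str]], clusters_b: List[List[str]]) -> List[List[str]]:
--     """
--     Find the best overlapping clusters from clusters_b for each cluster in clusters_a
--     and return a new list of clusters from clusters_b that best match each cluster in clusters_a.
--     """
--     # Initialize a list to store the best match for each cluster in clusters_a
--     best_matches = []
--
--     for cluster_a in clusters_a:
--         best_match_index = None
--         best_match_count = -1
--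
--         for j, cluster_b in enumerate(clusters_b):
--             overlap_count = len(set(cluster_a) & set(cluster_b))  # Count of common words
--
--             if overlap_count > best_match_count:
--                 best_match_count = overlap_count
--                 best_match_index = j
--
--         # Store the best matching cluster's index
--         best_matches.append(best_match_index)
--
--     # Form the new clusters list based on the best matches
--     transformed_clusters = [clusters_b[idx] if idx is not None else [] for idx in best_matches]
--
--     return transformed_clusters
-- ===== SOURCE B (Python) =====
-- def overlapped_clusters(clusters_a, clusters_b):
--     """
--     Inverted index word -> ascending indices of clusters_b containing it; per
--     cluster_a tally overlap counts in a dict and take the lowest-index maximum.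
--     """
--     index = {}
--     for j, cluster_b in enumerate(clusters_b):
--         for w in set(cluster_b):
--             index.setdefault(w, []).append(j)
--
--     out = []
--     for cluster_a in clusters_a:
--         counts = {}
--         for w in set(cluster_a):
--             for j in index.get(w, []):
--                 counts[j] = counts.get(j, 0) + 1
--         if clusters_b:
--             best = 0
--             for j in range(1, len(clusters_b)):
--                 if counts.get(j, 0) > counts.get(best, 0):
--                     best = j
--             out.append(clusters_b[best])
--         else:
--             out.append([])
--     return out
-- ===== Notes on version B (the rewrite author's own statement) =====
-- stated objective: faster
-- what changed: Replaces A's per-pair set intersections (rebuilding set(cluster_a) for every cluster_b) with an inverted index word->cluster_b indices built once, a per-cluster_a overlap tally dict, and a lowest-index argmax scan over the counts.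
import Mathlib
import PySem

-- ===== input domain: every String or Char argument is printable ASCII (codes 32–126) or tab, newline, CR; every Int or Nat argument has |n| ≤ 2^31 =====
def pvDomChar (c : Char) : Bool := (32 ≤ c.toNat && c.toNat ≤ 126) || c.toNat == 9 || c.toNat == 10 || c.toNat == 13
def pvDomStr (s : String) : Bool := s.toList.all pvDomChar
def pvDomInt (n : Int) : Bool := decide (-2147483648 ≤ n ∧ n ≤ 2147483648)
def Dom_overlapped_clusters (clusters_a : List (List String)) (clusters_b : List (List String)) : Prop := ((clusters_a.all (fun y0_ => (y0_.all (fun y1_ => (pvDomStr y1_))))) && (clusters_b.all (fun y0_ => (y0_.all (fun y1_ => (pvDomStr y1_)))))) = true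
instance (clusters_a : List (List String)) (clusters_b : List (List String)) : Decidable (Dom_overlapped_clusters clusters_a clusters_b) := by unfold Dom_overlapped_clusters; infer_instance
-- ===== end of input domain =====

-- B replaces A's per-pair set intersections with an inverted index word -> cluster_b
-- indices and a per-cluster_a tally (objective: faster; same results incl. ties).

-- ===== PORT A =====
def overlapped_clusters (clusters_a : List (List String)) (clusters_b : List (List String)) : List (List String) :=
  let best_matches : List (Option Int) :=
    clusters_a.foldl (fun acc cluster_a =>
      let r := (PySem.List.enumerate clusters_b).foldl
        (fun (st : Option Int × Int) p =>
          let overlap_count : Int :=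
            PySem.Set.len (PySem.Set.inter (PySem.Set.ofList cluster_a) (PySem.Set.ofList p.2))
          if overlap_count > st.2 then (some p.1, overlap_count) else st)
        (none, -1)
      acc ++ [r.1]) []
  -- clusters_b[idx]: idx is an enumerate index, always in range, so pyGetD is exact here
  best_matches.map (fun idx => match idx with
    | some i => PySem.List.pyGetD clusters_b i []
    | none => [])

-- ===== PORT B =====
def overlapped_clusters_alt (clusters_a : List (List String)) (clusters_b : List (List String)) : List (List String) :=
  let index : PySem.Dict String (List Int) :=
    (PySem.List.enumerate clusters_b).foldl
      (fun d p => (PySem.Set.ofList p.2).foldl (fun d w => d.modify w [] (· ++ [p.1])) d)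
      PySem.Dict.empty
  clusters_a.foldl (fun out cluster_a =>
    let counts : PySem.Dict Int Int :=
      (PySem.Set.ofList cluster_a).foldl
        (fun d w => (index.getD w []).foldl (fun d j => d.modify j 0 (· + 1)) d)
        PySem.Dict.empty
    if clusters_b = [] then out ++ [[]]
    else
      let best := (PySem.List.pyRange 1 (PySem.List.len clusters_b)).foldl
        (fun best j => if counts.getD j 0 > counts.getD best 0 then j else best) 0
      -- clusters_b[best]: 0 ≤ best < len clusters_b, so pyGetD is exact here
      out ++ [PySem.List.pyGetD clusters_b best []]) []

-- ===== PRECONDITION & SPEC =====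
def Spec_overlapped_clusters (clusters_a : List (List String)) (clusters_b : List (List String)) (out : List (List String)) : Prop := out = overlapped_clusters_alt clusters_a clusters_b
instance (clusters_a : List (List String)) (clusters_b : List (List String)) (out : List (List String)) : Decidable (Spec_overlapped_clusters clusters_a clusters_b out) := by unfold Spec_overlapped_clusters; infer_instance

-- ===== CLAIM (what is proved, stated in full; the proofs are below) =====
def Claim_equal_overlapped_clusters : Prop := ∀ (clusters_a : List (List String)) (clusters_b : List (List String)), Dom_overlapped_clusters clusters_a clusters_b → Spec_overlapped_clusters clusters_a clusters_b (overlapped_clusters clusters_a clusters_b)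

-- ===== LEMMAS AND PROOFS =====

-- the inverted index of B
def pvIndex (clusters_b : List (List String)) : PySem.Dict String (List Int) :=
  (PySem.List.enumerate clusters_b).foldl
    (fun d p => (PySem.Set.ofList p.2).foldl (fun d w => d.modify w [] (· ++ [p.1])) d)
    PySem.Dict.empty

-- the tally of B for one cluster of clusters_a
def pvCounts (ca1 : List String) (clusters_b : List (List String)) : PySem.Dict Int Int :=
  (PySem.Set.ofList ca1).foldl
    (fun d w => ((pvIndex clusters_b).getD w []).foldl (fun d j => d.modify j 0 (· + 1)) d)
    PySem.Dict.empty

-- A's overlap key for index j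
def pvF (ca1 : List String) (cb : List (List String)) (j : Int) : Int :=
  PySem.Set.len (PySem.Set.inter (PySem.Set.ofList ca1) (PySem.Set.ofList (PySem.List.pyGetD cb j [])))

lemma pvIndex_getD (cb : List (List String)) (w : String) :
    (pvIndex cb).getD w [] =
      (((PySem.List.enumerate cb).flatMap
        (fun (p : Int × List String) => (PySem.Set.ofList p.2).map (fun w' => (w', p.1)))).filter
          (fun (q : String × Int) => q.1 == w)).map (·.2) := by
  have h1 : pvIndex cb
      = ((PySem.List.enumerate cb).flatMap
          (fun (p : Int × List String) => (PySem.Set.ofList p.2).map (fun w' => (w', p.1)))).foldl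
        (fun d (q : String × Int) => d.modify q.1 [] (· ++ [q.2])) PySem.Dict.empty := by
    rw [List.foldl_flatMap]
    unfold pvIndex
    apply PySem.List.foldl_congr_mem
    intro acc p _
    rw [List.foldl_map]
  rw [h1, PySem.Dict.getD_foldl_modify_append]
  simp [PySem.Dict.empty, PySem.Dict.getD, PySem.Dict.get?]

lemma pvSum_zero (c : Int → Nat) (j : Int) : ∀ (l : List Int), j ∉ l →
    (l.map (fun k => if k = j then c k else 0)).sum = 0 := by
  intro l hj
  induction l with
  | nil => rfl
  | cons a t ih =>
    simp only [List.map_cons, List.sum_cons]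
    rw [if_neg (by rintro rfl; exact hj (by simp)), ih (fun h => hj (by simp [h]))]

lemma pvSum_ite (c : Int → Nat) (j : Int) : ∀ (l : List Int), l.Nodup → j ∈ l →
    (l.map (fun k => if k = j then c k else 0)).sum = c j := by
  intro l
  induction l with
  | nil => intro _ h; cases h
  | cons a t ih =>
    intro hnd hm
    simp only [List.map_cons, List.sum_cons]
    by_cases h : a = j
    · subst h
      rw [if_pos rfl, pvSum_zero c a t (by simp at hnd; exact hnd.1)]
      simp
    · rw [if_neg h]
      rcases List.mem_cons.1 hm with h' | hm'
      · exact absurd h'.symm h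
      · rw [ih (List.Nodup.of_cons hnd) hm']
        simp

lemma pvIndex_count (cb : List (List String)) (w : String) (j : Int)
    (h0 : 0 ≤ j) (hn : j < (cb.length : Int)) :
    (((pvIndex cb).getD w []).count j : Int) =
      if (PySem.Set.ofList (PySem.List.pyGetD cb j [])).contains w then 1 else 0 := by
  rw [pvIndex_getD]
  rw [List.count_eq_countP, List.countP_map, List.countP_filter, List.countP_flatMap]
  rw [List.map_congr_left (l := PySem.List.enumerate cb)
    (g := fun p => (fun k => if k = j then (if (PySem.Set.ofList (PySem.List.pyGetD cb k [])).contains w then 1 else 0) else 0) p.1) ?hc]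
  case hc =>
    intro p hp
    rcases (PySem.List.mem_enumerate_iff cb 0 p).1 hp with ⟨k, hk, hpe⟩
    subst hpe
    simp only [Function.comp_apply, List.countP_map, zero_add]
    by_cases hkj : ((k : Int)) = j
    · subst hkj
      rw [if_pos rfl]
      have hget : PySem.List.pyGetD cb (k : Int) [] = cb[k] := by
        simp [PySem.List.pyGetD_natCast, List.getElem?_eq_getElem hk]
      rw [hget]
      have hcp : (List.countP ((fun (a : String × Int) => a.2 == (k:Int) && a.1 == w) ∘ fun w' => ((w', (k:Int)) : String × Int)) (PySem.Set.ofList cb[k]))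
          = (PySem.Set.ofList cb[k]).count w := by
        rw [List.count_eq_countP]
        apply List.countP_congr
        intro a _
        simp
      rw [hcp]
      by_cases hmem : w ∈ PySem.Set.ofList cb[k]
      · rw [List.count_eq_one_of_mem (PySem.Set.nodup_ofList _) hmem, if_pos]
        simpa [PySem.Set.contains, List.contains_iff_mem] using hmem
      · rw [List.count_eq_zero_of_not_mem hmem, if_neg]
        simpa [PySem.Set.contains, List.contains_iff_mem] using hmem
    · rw [if_neg hkj, List.countP_eq_zero.2]
      intro x hx
      simp only [Function.comp_apply, Bool.and_eq_true, beq_iff_eq]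
      rintro ⟨h1, _⟩
      exact hkj h1
  · have hmm : (PySem.List.enumerate cb).map (fun p => (fun k => if k = j then (if (PySem.Set.ofList (PySem.List.pyGetD cb k [])).contains w then 1 else 0) else 0) p.1)
        = ((PySem.List.enumerate cb).map (·.1)).map (fun k => if k = j then (if (PySem.Set.ofList (PySem.List.pyGetD cb k [])).contains w then 1 else 0) else 0) := by
      rw [List.map_map]; rfl
    rw [hmm, PySem.List.map_fst_enumerate]
    have hmem : j ∈ PySem.List.pyRange 0 (0 + (cb.length : Int)) := by
      rw [PySem.List.mem_pyRange_one]; omega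
    rw [pvSum_ite (fun k => if (PySem.Set.ofList (PySem.List.pyGetD cb k [])).contains w then 1 else 0) j _ (PySem.List.nodup_pyRange_one _ _) hmem]
    split_ifs <;> simp

lemma pvCounts_aux (cb : List (List String)) (ws : List String) :
    ∀ (d : PySem.Dict Int Int) (j : Int),
      (ws.foldl (fun d w => ((pvIndex cb).getD w []).foldl (fun d j => d.modify j 0 (· + 1)) d) d).getD j 0
      = d.getD j 0 + (ws.map (fun w => ((((pvIndex cb).getD w []).count j : Nat) : Int))).sum := by
  induction ws with
  | nil => intro d j; simp
  | cons w t ih =>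
    intro d j
    simp only [List.foldl_cons, List.map_cons, List.sum_cons]
    rw [ih, PySem.Dict.getD_foldl_modify_add_one]
    ring

lemma pvCounts_getD (ca1 : List String) (cb : List (List String)) (j : Int)
    (h0 : 0 ≤ j) (hn : j < (cb.length : Int)) :
    (pvCounts ca1 cb).getD j 0 = pvF ca1 cb j := by
  unfold pvCounts
  rw [pvCounts_aux]
  have hz : (PySem.Dict.empty : PySem.Dict Int Int).getD j 0 = 0 := by
    simp [PySem.Dict.empty, PySem.Dict.getD, PySem.Dict.get?]
  rw [hz, zero_add]
  rw [List.map_congr_left (fun w _ => pvIndex_count cb w j h0 hn)]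
  rw [PySem.List.sum_map_ite_one_zero]
  unfold pvF
  simp only [PySem.Set.len, PySem.Set.inter]
  rw [List.countP_eq_length_filter]

-- A's inner fold, once started, tracks the running first-argmax
lemma pvArgmax_aux (f : Int → Int) (l : List Int) :
    ∀ (b : Int),
      (l.foldl (fun (st : Option Int × Int) j => if f j > st.2 then (some j, f j) else st) (some b, f b))
      = (some (l.foldl (fun best j => if f j > f best then j else best) b),
         f (l.foldl (fun best j => if f j > f best then j else best) b)) := by
  induction l with
  | nil => intro b; simp
  | cons j t ih =>
    intro b
    simp only [List.foldl_cons]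
    by_cases h : f j > f b
    · simp only [h, if_true]; exact ih j
    · simp only [h, if_false]; exact ih b

lemma pvSel_congr (f g : Int → Int) (l : List Int) :
    ∀ (b : Int), (∀ j ∈ l, f j = g j) → f b = g b →
      l.foldl (fun best j => if f j > f best then j else best) b
      = l.foldl (fun best j => if g j > g best then j else best) b := by
  induction l with
  | nil => intro b _ _; rfl
  | cons j t ih =>
    intro b hl hb
    have hj : f j = g j := hl j (by simp)
    simp only [List.foldl_cons]
    rw [hj, hb]
    by_cases h : g j > g b
    · rw [if_pos h]; exact ih j (fun x hx => hl x (by simp [hx])) hj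
    · rw [if_neg h]; exact ih b (fun x hx => hl x (by simp [hx])) hb

-- one cluster of clusters_a: A's pick equals B's pick
lemma pvPer (ca1 : List String) (cb : List (List String)) :
    (match ((PySem.List.enumerate cb).foldl
        (fun (st : Option Int × Int) p =>
          if PySem.Set.len (PySem.Set.inter (PySem.Set.ofList ca1) (PySem.Set.ofList p.2)) > st.2
          then (some p.1, PySem.Set.len (PySem.Set.inter (PySem.Set.ofList ca1) (PySem.Set.ofList p.2)))
          else st)
        (none, -1)).1 with
      | some i => PySem.List.pyGetD cb i []
      | none => []) =
    (if cb = [] then ([] : List String)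
     else PySem.List.pyGetD cb
       ((PySem.List.pyRange 1 (PySem.List.len cb)).foldl
         (fun best j => if (pvCounts ca1 cb).getD j 0 > (pvCounts ca1 cb).getD best 0 then j else best) 0) []) := by
  by_cases hcb : cb = []
  · subst hcb
    simp [PySem.List.enumerate]
  · rw [if_neg hcb]
    have hn : 0 < (cb.length : Int) := by
      have := List.length_pos_of_ne_nil hcb
      omega
    have hA : (PySem.List.enumerate cb).foldl
        (fun (st : Option Int × Int) p =>
          if PySem.Set.len (PySem.Set.inter (PySem.Set.ofList ca1) (PySem.Set.ofList p.2)) > st.2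
          then (some p.1, PySem.Set.len (PySem.Set.inter (PySem.Set.ofList ca1) (PySem.Set.ofList p.2)))
          else st)
        (none, -1)
        = (PySem.List.pyRange 0 (cb.length : Int)).foldl
          (fun (st : Option Int × Int) j => if pvF ca1 cb j > st.2 then (some j, pvF ca1 cb j) else st)
          (none, -1) := by
      rw [PySem.List.enumerate_eq_map_pyRange cb [], List.foldl_map]
      rfl
    rw [hA]
    rw [PySem.List.pyRange_one_cons hn]
    simp only [List.foldl_cons]
    have h0 : pvF ca1 cb 0 > (-1 : Int) := by
      have : (0 : Int) ≤ pvF ca1 cb 0 := by unfold pvF; simp [PySem.Set.len]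
      omega
    rw [if_pos h0]
    rw [pvArgmax_aux (pvF ca1 cb) (PySem.List.pyRange (0+1) (cb.length : Int)) 0]
    have hsel : (PySem.List.pyRange (0+1) (cb.length : Int)).foldl
        (fun best j => if pvF ca1 cb j > pvF ca1 cb best then j else best) 0
        = (PySem.List.pyRange 1 (PySem.List.len cb)).foldl
          (fun best j => if (pvCounts ca1 cb).getD j 0 > (pvCounts ca1 cb).getD best 0 then j else best) 0 := by
      have h01 : (0:Int) + 1 = 1 := by norm_num
      rw [h01]
      have hlen : PySem.List.len cb = (cb.length : Int) := by simp [PySem.List.len]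
      rw [hlen]
      apply pvSel_congr
      · intro j hj
        rw [PySem.List.mem_pyRange_one] at hj
        exact (pvCounts_getD ca1 cb j (by omega) hj.2).symm
      · exact (pvCounts_getD ca1 cb 0 le_rfl hn).symm
    rw [hsel]

-- ===== VERDICT (by name: the statement is the Claim_ definition above) =====
theorem overlapped_clusters_spec : Claim_equal_overlapped_clusters := by
  intro clusters_a clusters_b _
  unfold Spec_overlapped_clusters
  have hA' : overlapped_clusters clusters_a clusters_b
      = clusters_a.map (fun ca1 =>
          (match ((PySem.List.enumerate clusters_b).foldl
              (fun (st : Option Int × Int) p =>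
                if PySem.Set.len (PySem.Set.inter (PySem.Set.ofList ca1) (PySem.Set.ofList p.2)) > st.2
                then (some p.1, PySem.Set.len (PySem.Set.inter (PySem.Set.ofList ca1) (PySem.Set.ofList p.2)))
                else st)
              (none, -1)).1 with
            | some i => PySem.List.pyGetD clusters_b i []
            | none => [])) := by
    show (clusters_a.foldl
        (fun acc ca1 => acc ++ [((PySem.List.enumerate clusters_b).foldl
          (fun (st : Option Int × Int) p =>
            if PySem.Set.len (PySem.Set.inter (PySem.Set.ofList ca1) (PySem.Set.ofList p.2)) > st.2
            then (some p.1, PySem.Set.len (PySem.Set.inter (PySem.Set.ofList ca1) (PySem.Set.ofList p.2)))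
            else st)
          (none, -1)).1]) []).map
        (fun idx => match idx with
          | some i => PySem.List.pyGetD clusters_b i []
          | none => []) = _
    rw [PySem.List.foldl_append_singleton_eq_map]
    simp [List.map_map, Function.comp]
  have hB' : overlapped_clusters_alt clusters_a clusters_b
      = clusters_a.map (fun ca1 =>
          if clusters_b = [] then []
          else PySem.List.pyGetD clusters_b
            ((PySem.List.pyRange 1 (PySem.List.len clusters_b)).foldl
              (fun best j => if (pvCounts ca1 clusters_b).getD j 0 > (pvCounts ca1 clusters_b).getD best 0 then j else best) 0) []) := by
    show clusters_a.foldl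
        (fun out ca1 =>
          if clusters_b = [] then out ++ [[]]
          else out ++ [PySem.List.pyGetD clusters_b
            ((PySem.List.pyRange 1 (PySem.List.len clusters_b)).foldl
              (fun best j => if (pvCounts ca1 clusters_b).getD j 0 > (pvCounts ca1 clusters_b).getD best 0 then j else best) 0) []]) [] = _
    rw [PySem.List.foldl_congr_mem _ _
      (fun out ca1 => out ++ [if clusters_b = [] then []
        else PySem.List.pyGetD clusters_b
          ((PySem.List.pyRange 1 (PySem.List.len clusters_b)).foldl
            (fun best j => if (pvCounts ca1 clusters_b).getD j 0 > (pvCounts ca1 clusters_b).getD best 0 then j else best) 0) []]) _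
      (by intro acc x _; by_cases h : clusters_b = [] <;> simp [h])]
    rw [PySem.List.foldl_append_singleton_eq_map]
    simp
  rw [hA', hB']
  exact List.map_congr_left (fun ca1 _ => pvPer ca1 clusters_b)
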